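-- pv_equiv track=rewrite | github.com/namboy94/kudubot | whatsbot/plugins/localServicePlugins/Casino.py | encode_money_string
-- ===== SOURCE A (Python) =====
-- def encode_money_string(dollars, cents, delimiters=False):
--     """
--     Encodes a tuple of dollars and cents to a moneyString
--     :param dollars: the amount of dollars
--     :param cents: the amount of cents
--     :param delimiters: switch for enabling delimiters
--     :return: the encoded dollar string
--     """
--     cent_string = str(cents)
--     if len(cent_string) < 2:
--         cent_string = "0" + cent_string
--     if len(cent_string) < 2:
--         cent_string = "0" + cent_string
--     if not delimiters:
--         return str(dollars) + "." + cent_string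
--     else:
--         dollar_string = str(dollars)
--         dollar_list = []
--         for char in dollar_string:
--             dollar_list.insert(0, char)
--         formated_dollar_string = ""
--         i = 0
--         while i < len(dollar_list):
--             if i > 0 and i % 3 == 0:
--                 formated_dollar_string = " " + formated_dollar_string
--             formated_dollar_string = dollar_list[i] + formated_dollar_string
--             i += 1
--         return formated_dollar_string + "." + cent_string
-- ===== SOURCE B (Python) =====
-- def encode_money_string(dollars, cents, delimiters=False):
--     """Same result as A: cents zero-padded to 2 via zfill; dollars grouped
--     in threes from the right by slicing into chunks and joining with spaces."""
--     cent_string = str(cents).zfill(2)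
--     s = str(dollars)
--     if not delimiters:
--         return s + "." + cent_string
--     chunks = []
--     while s:
--         chunks.insert(0, s[-3:])
--         s = s[:-3]
--     return " ".join(chunks) + "." + cent_string
-- ===== Notes on version B (the rewrite author's own statement) =====
-- stated objective: simpler
-- what changed: B pads cents with str.zfill(2) instead of two padding ifs, and builds the delimited dollar string by slicing 3-character chunks off the right and ' '.join-ing them, instead of A's character-by-character reversal plus an index-counting while loop that inserts spaces.
import Mathlib
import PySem

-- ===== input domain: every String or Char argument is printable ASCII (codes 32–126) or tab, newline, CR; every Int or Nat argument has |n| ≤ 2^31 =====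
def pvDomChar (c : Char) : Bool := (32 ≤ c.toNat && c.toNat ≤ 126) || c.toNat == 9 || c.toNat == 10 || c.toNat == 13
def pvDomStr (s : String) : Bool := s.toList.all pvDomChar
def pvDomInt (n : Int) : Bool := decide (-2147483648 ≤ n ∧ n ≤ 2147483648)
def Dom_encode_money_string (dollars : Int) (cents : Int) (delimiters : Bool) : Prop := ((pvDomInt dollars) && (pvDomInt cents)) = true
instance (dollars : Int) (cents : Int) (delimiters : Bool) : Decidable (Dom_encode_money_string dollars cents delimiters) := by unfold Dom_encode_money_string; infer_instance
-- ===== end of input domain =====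

-- B formats the money string by zfill-padding the cents and slicing the dollar string
-- into 3-char chunks from the right joined by spaces, instead of A's reverse-and-count loop (simpler).

-- ===== PORT A =====
-- the while loop: i runs 0,1,… over dollar_list, dollar_list[i] visited in order,
-- prepending " " when i > 0 and i % 3 == 0, then prepending dollar_list[i]
def pvALoop : List Char → Nat → List Char → List Char
  | [], _, acc => acc
  | c :: rest, i, acc =>
      pvALoop rest (i + 1) (c :: (if 0 < i ∧ i % 3 = 0 then ' ' :: acc else acc))

def encode_money_string (dollars : Int) (cents : Int) (delimiters : Bool) : String :=
  let cent0 := PySem.Int.toChars cents                                -- cent_string = str(cents)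
  let cent1 := if cent0.length < 2 then '0' :: cent0 else cent0       -- first padding if
  let cent2 := if cent1.length < 2 then '0' :: cent1 else cent1       -- second padding if
  if !delimiters then
    String.mk (PySem.Int.toChars dollars ++ '.' :: cent2)
  else
    let dollar_string := PySem.Int.toChars dollars
    let dollar_list := dollar_string.foldl (fun acc c => c :: acc) [] -- for char: dollar_list.insert(0, char)
    String.mk (pvALoop dollar_list 0 [] ++ '.' :: cent2)

-- ===== PORT B =====
-- while s: chunks.insert(0, s[-3:]); s = s[:-3]   (insert-at-front of the chunk peeled
-- off the right = recursive call on s[:-3] followed by the last chunk)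
def pvChunks (s : List Char) : List (List Char) :=
  if h : s = [] then []
  else
    pvChunks (PySem.List.slice s none (some (-3))) ++ [PySem.List.slice s (some (-3)) none]
termination_by s.length
decreasing_by
  rw [PySem.List.slice_to_neg_ofNat s 3 (by omega)]
  have : s.length ≠ 0 := fun hz => h (List.eq_nil_of_length_eq_zero hz)
  simp [List.length_take]; omega

def encode_money_string_alt (dollars : Int) (cents : Int) (delimiters : Bool) : String :=
  let cent_string := PySem.Chars.zfill (PySem.Int.toChars cents) 2    -- str(cents).zfill(2)
  let s := PySem.Int.toChars dollars
  if !delimiters then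
    String.mk (s ++ '.' :: cent_string)
  else
    String.mk (PySem.Chars.join [' '] (pvChunks s) ++ '.' :: cent_string)  -- " ".join(chunks)

-- ===== PRECONDITION & SPEC =====
def Spec_encode_money_string (dollars : Int) (cents : Int) (delimiters : Bool) (out : String) : Prop := out = encode_money_string_alt dollars cents delimiters
instance (dollars : Int) (cents : Int) (delimiters : Bool) (out : String) : Decidable (Spec_encode_money_string dollars cents delimiters out) := by unfold Spec_encode_money_string; infer_instance

-- ===== CLAIM (what is proved, stated in full; the proofs are below) =====
def Claim_equal_encode_money_string : Prop := ∀ (dollars : Int) (cents : Int) (delimiters : Bool), Dom_encode_money_string dollars cents delimiters → Spec_encode_money_string dollars cents delimiters (encode_money_string dollars cents delimiters)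

-- ===== LEMMAS AND PROOFS =====

-- every char written by Nat.toDigitsCore is a digitChar or comes from the accumulator
theorem pv_mem_toDigitsCore (b : Nat) : ∀ (f n : Nat) (l : List Char) (c : Char),
    c ∈ Nat.toDigitsCore b f n l → c ∈ l ∨ ∃ d, c = Nat.digitChar d := by
  intro f
  induction f with
  | zero => intro n l c hc; exact Or.inl hc
  | succ f ih =>
    intro n l c hc
    simp only [Nat.toDigitsCore] at hc
    by_cases h : n / b = 0
    · rw [if_pos h] at hc
      rcases List.mem_cons.mp hc with h1 | h1
      · exact Or.inr ⟨n % b, h1⟩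
      · exact Or.inl h1
    · rw [if_neg h] at hc
      rcases ih (n / b) ((n % b).digitChar :: l) c hc with h1 | h1
      · rcases List.mem_cons.mp h1 with h2 | h2
        · exact Or.inr ⟨n % b, h2⟩
        · exact Or.inl h2
      · exact Or.inr h1

theorem pv_digitChar_ne_sign (d : Nat) : Nat.digitChar d ≠ '+' ∧ Nat.digitChar d ≠ '-' := by
  by_cases h : d < 16
  · interval_cases d <;> exact ⟨by decide, by decide⟩
  · have he : Nat.digitChar d = '*' := by
      unfold Nat.digitChar
      rw [if_neg (by omega), if_neg (by omega), if_neg (by omega), if_neg (by omega),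
          if_neg (by omega), if_neg (by omega), if_neg (by omega), if_neg (by omega),
          if_neg (by omega), if_neg (by omega), if_neg (by omega), if_neg (by omega),
          if_neg (by omega), if_neg (by omega), if_neg (by omega), if_neg (by omega)]
    rw [he]
    exact ⟨by decide, by decide⟩

theorem pv_toDigitsCore_ne_nil (b : Nat) : ∀ (f n : Nat) (l : List Char),
    Nat.toDigitsCore b (f + 1) n l ≠ [] := by
  intro f
  induction f with
  | zero =>
    intro n l
    simp only [Nat.toDigitsCore]
    split <;> simp
  | succ f ih =>
    intro n l
    simp only [Nat.toDigitsCore]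
    split
    · simp
    · exact ih _ _

theorem pv_toDigits_ne_nil (b n : Nat) : Nat.toDigits b n ≠ [] := by
  unfold Nat.toDigits
  exact pv_toDigitsCore_ne_nil b n n []

-- the cents side: A's two padding ifs equal zfill(2)
theorem pv_cent_eq (n : Int) :
    (let cent0 := PySem.Int.toChars n
     let cent1 := if cent0.length < 2 then '0' :: cent0 else cent0
     if cent1.length < 2 then '0' :: cent1 else cent1) = PySem.Chars.zfill (PySem.Int.toChars n) 2 := by
  simp only []
  by_cases hlen : (PySem.Int.toChars n).length < 2
  · -- short: exactly one char (toChars is never empty), and it is a digit char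
    have hne : PySem.Int.toChars n ≠ [] := by
      unfold PySem.Int.toChars
      split
      · simp
      · exact pv_toDigits_ne_nil 10 n.toNat
    have h1 : (PySem.Int.toChars n).length = 1 := by
      have hpos : 0 < (PySem.Int.toChars n).length := List.length_pos_of_ne_nil hne
      omega
    obtain ⟨c, hc⟩ := List.length_eq_one_iff.mp h1
    have hcd : c ≠ '+' ∧ c ≠ '-' := by
      have hmem : c ∈ PySem.Int.toChars n := by rw [hc]; exact List.mem_singleton.mpr rfl
      unfold PySem.Int.toChars at hmem
      split at hmem
      · -- negative: '-' :: toDigits has length ≥ 2, contradicting h1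
        exfalso
        unfold PySem.Int.toChars at h1
        rw [if_pos (by assumption)] at h1
        simp only [List.length_cons] at h1
        exact pv_toDigits_ne_nil 10 n.natAbs
          (List.eq_nil_of_length_eq_zero (by omega))
      · rcases pv_mem_toDigitsCore 10 _ _ _ c hmem with h | ⟨d, hd⟩
        · simp at h
        · rw [hd]; exact pv_digitChar_ne_sign d
    rw [hc]
    unfold PySem.Chars.zfill
    simp [hcd.1, hcd.2]
  · -- already ≥ 2 chars: both sides leave it unchanged
    rw [if_neg hlen, if_neg hlen]
    unfold PySem.Chars.zfill
    rw [if_pos (by simp; omega)]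

-- foldl with insert-at-front is reversal
theorem pv_foldl_cons (s acc : List Char) :
    s.foldl (fun acc c => c :: acc) acc = s.reverse ++ acc := by
  induction s generalizing acc with
  | nil => simp
  | cons c rest ih => simp [List.foldl, ih, List.reverse_cons]

-- pvALoop written with an explicit output segment
def pvG : List Char → Nat → List Char
  | [], _ => []
  | c :: rest, i => pvG rest (i + 1) ++ c :: (if 0 < i ∧ i % 3 = 0 then [' '] else [])

theorem pv_aloop_eq_g (r : List Char) : ∀ (i : Nat) (acc : List Char),
    pvALoop r i acc = pvG r i ++ acc := by
  induction r with
  | nil => intro i acc; simp [pvALoop, pvG]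
  | cons c rest ih =>
    intro i acc
    simp only [pvALoop, pvG, ih]
    split_ifs <;> simp

theorem pv_g_append (a : List Char) : ∀ (b : List Char) (i : Nat),
    pvG (a ++ b) i = pvG b (i + a.length) ++ pvG a i := by
  induction a with
  | nil => intro b i; simp [pvG]
  | cons c rest ih =>
    intro b i
    simp only [List.cons_append, pvG, ih, List.length_cons]
    have : i + 1 + rest.length = i + (rest.length + 1) := by omega
    rw [this]
    simp

-- a run of indices none of which triggers a space just reverses
theorem pv_g_nospace (r : List Char) : ∀ (i : Nat),
    (∀ k, k < r.length → ¬(0 < i + k ∧ (i + k) % 3 = 0)) → pvG r i = r.reverse := by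
  induction r with
  | nil => intro i _; simp [pvG]
  | cons c rest ih =>
    intro i h
    have h0 : ¬(0 < i ∧ i % 3 = 0) := by
      have := h 0 (by simp)
      simpa using this
    simp only [pvG, if_neg h0]
    rw [ih (i + 1) (fun k hk => by
      have := h (k + 1) (by simp; omega)
      intro hcon; exact this (by omega))]
    simp

-- unfolding pvChunks with the slices rewritten to take/drop
theorem pv_chunks_nil : pvChunks [] = [] := by
  rw [pvChunks]; simp

theorem pv_chunks_cons (s : List Char) (h : s ≠ []) :
    pvChunks s = pvChunks (s.take (s.length - 3)) ++ [s.drop (s.length - 3)] := by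
  rw [pvChunks]
  rw [dif_neg h, PySem.List.slice_to_neg_ofNat s 3 (by omega),
      PySem.List.slice_from_neg_ofNat s 3 (by omega)]

theorem pv_chunks_ne_nil (s : List Char) (h : s ≠ []) : pvChunks s ≠ [] := by
  rw [pv_chunks_cons s h]; simp

theorem pv_join_append_singleton (y : List Char) : ∀ (xs : List (List Char)), xs ≠ [] →
    PySem.Chars.join [' '] (xs ++ [y]) = PySem.Chars.join [' '] xs ++ ' ' :: y := by
  intro xs
  induction xs with
  | nil => intro h; exact absurd rfl h
  | cons x rest ih =>
    intro _
    cases rest with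
    | nil => simp [PySem.Chars.join_cons_cons, PySem.Chars.join_singleton]
    | cons x' rest' =>
      have ihh := ih (by simp)
      simp only [List.cons_append] at ihh ⊢
      rw [PySem.Chars.join_cons_cons, PySem.Chars.join_cons_cons, ihh]
      simp

-- a block of ≤ 3 chars processed at a phase i > 0, i % 3 = 0: the first char gets the space
theorem pv_g_block (r : List Char) (i : Nat) (hne : r ≠ []) (hlen : r.length ≤ 3)
    (hi : 0 < i) (hmod : i % 3 = 0) : pvG r.reverse i = r ++ [' '] := by
  obtain ⟨c, rest, hr⟩ : ∃ c rest, r.reverse = c :: rest := by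
    rcases hrev : r.reverse with _ | ⟨c, rest⟩
    · exact absurd (by simpa using congrArg List.reverse hrev) hne
    · exact ⟨c, rest, rfl⟩
  have hrl : rest.length ≤ 2 := by
    have := congrArg List.length hr
    simp at this; omega
  rw [hr]
  have hcond : 0 < i ∧ i % 3 = 0 := ⟨hi, hmod⟩
  simp only [pvG, if_pos hcond]
  rw [pv_g_nospace rest (i + 1) (fun k hk hcon => by omega)]
  have : r = rest.reverse ++ [c] := by
    have := congrArg List.reverse hr
    simpa using this
  rw [this]; simp

-- main grouping lemma, shifted phase: t ≠ [], phase i > 0 divisible by 3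
theorem pv_g_grouped_shift (n : Nat) : ∀ (t : List Char), t.length = n → t ≠ [] →
    ∀ i, 0 < i → i % 3 = 0 →
    pvG t.reverse i = PySem.Chars.join [' '] (pvChunks t) ++ [' '] := by
  induction n using Nat.strong_induction_on with
  | _ n ih =>
    intro t hn hne i hi hmod
    by_cases hsmall : t.length ≤ 3
    · rw [pv_chunks_cons t hne]
      have h3 : t.length - 3 = 0 := by omega
      rw [h3]
      simp only [List.take_zero, List.drop_zero, pv_chunks_nil, List.nil_append,
        PySem.Chars.join_singleton]
      exact pv_g_block t i hne hsmall hi hmod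
    · set t' := t.take (t.length - 3) with ht'
      set b := t.drop (t.length - 3) with hb
      have htb : t = t' ++ b := (List.take_append_drop _ t).symm
      have hbl : b.length = 3 := by rw [hb]; simp; omega
      have ht'ne : t' ≠ [] := by
        intro hz
        have := congrArg List.length hz
        rw [ht'] at this; simp at this; omega
      have hbne : b ≠ [] := by
        intro hz; have := congrArg List.length hz; rw [hbl] at this; simp at this
      calc pvG t.reverse i = pvG (b.reverse ++ t'.reverse) i := by rw [htb]; simp
        _ = pvG t'.reverse (i + 3) ++ pvG b.reverse i := by
              rw [pv_g_append b.reverse t'.reverse i]; simp [hbl]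
        _ = (PySem.Chars.join [' '] (pvChunks t') ++ [' ']) ++ (b ++ [' ']) := by
              rw [pv_g_block b i hbne (by omega) hi hmod,
                  ih t'.length (by rw [ht']; simp; omega) t' rfl ht'ne (i + 3)
                    (by omega) (by omega)]
        _ = PySem.Chars.join [' '] (pvChunks t) ++ [' '] := by
              rw [pv_chunks_cons t hne, ← ht', ← hb,
                  pv_join_append_singleton b (pvChunks t') (pv_chunks_ne_nil t' ht'ne)]
              simp

-- main grouping lemma at phase 0
theorem pv_g_grouped (n : Nat) : ∀ (s : List Char), s.length = n →
    pvG s.reverse 0 = PySem.Chars.join [' '] (pvChunks s) := by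
  induction n using Nat.strong_induction_on with
  | _ n ih =>
    intro s hn
    by_cases hnil : s = []
    · subst hnil
      simp [pvG, pv_chunks_nil, PySem.Chars.join_nil]
    · by_cases hsmall : s.length ≤ 3
      · rw [pv_chunks_cons s hnil]
        have h3 : s.length - 3 = 0 := by omega
        rw [h3]
        simp only [List.take_zero, List.drop_zero, pv_chunks_nil, List.nil_append,
          PySem.Chars.join_singleton]
        rw [pv_g_nospace s.reverse 0 (fun k hk hcon => by simp at hk; omega)]
        simp
      · set s' := s.take (s.length - 3) with hs'
        set b := s.drop (s.length - 3) with hb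
        have htb : s = s' ++ b := (List.take_append_drop _ s).symm
        have hbl : b.length = 3 := by rw [hb]; simp; omega
        have hs'ne : s' ≠ [] := by
          intro hz
          have := congrArg List.length hz
          rw [hs'] at this; simp at this; omega
        calc pvG s.reverse 0 = pvG (b.reverse ++ s'.reverse) 0 := by rw [htb]; simp
          _ = pvG s'.reverse 3 ++ pvG b.reverse 0 := by
                rw [pv_g_append b.reverse s'.reverse 0]; simp [hbl]
          _ = (PySem.Chars.join [' '] (pvChunks s') ++ [' ']) ++ b := by
                rw [pv_g_nospace b.reverse 0 (fun k hk hcon => by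
                      simp [hbl] at hk; omega),
                    pv_g_grouped_shift s'.length s' rfl hs'ne 3 (by omega) (by omega)]
                simp
          _ = PySem.Chars.join [' '] (pvChunks s) := by
                rw [pv_chunks_cons s hnil, ← hs', ← hb,
                    pv_join_append_singleton b (pvChunks s') (pv_chunks_ne_nil s' hs'ne)]
                simp

-- the dollars side: A's reverse-and-count loop equals B's chunk-and-join
theorem pv_dollar_eq (s : List Char) :
    pvALoop (s.foldl (fun acc c => c :: acc) []) 0 [] =
      PySem.Chars.join [' '] (pvChunks s) := by
  rw [pv_foldl_cons s [], List.append_nil, pv_aloop_eq_g, List.append_nil]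
  exact pv_g_grouped s.length s rfl

-- ===== VERDICT (by name: the statement is the Claim_ definition above) =====
theorem encode_money_string_spec : Claim_equal_encode_money_string := by
  intro dollars cents delimiters _
  unfold Spec_encode_money_string encode_money_string encode_money_string_alt
  simp only []
  rw [pv_cent_eq cents]
  cases delimiters with
  | false => rfl
  | true => rw [pv_dollar_eq (PySem.Int.toChars dollars)]
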